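-- pv_equiv track=rewrite | github.com/hmapxashike-netizen/loan-calculator | id_service.py | validate_customer_id
-- ===== SOURCE A (Python) =====
-- from typing import Final
--
-- _CUSTOMER_ID_PREFIX: Final[str] = "C"
--
-- _CUSTOMER_ID_DISPLAY_LEN: Final[int] = 12  # e.g. CXXX-XXX-XXX
--
-- _CUSTOMER_ID_ALPHABET: Final[str] = "ABCDEFGHJKLMNPQRSTUVWXYZ23456789"
--
-- def validate_customer_id(value: str) -> bool:
--     """
--     Validate a customer ID string.
--
--     Rules:
--     - Format: CXXX-XXX-XXX (length 12 with hyphens).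
--     - 'C' prefix.
--     - Only allowed alphabet characters (no I, L, O, U, 0, 1) in the body.
--     """
--     if not isinstance(value, str):
--         return False
--     if len(value) != _CUSTOMER_ID_DISPLAY_LEN:
--         return False
--     if value[0] != _CUSTOMER_ID_PREFIX:
--         return False
--     if value[4] != "-" or value[8] != "-":
--         return False
--
--     # Strip hyphens and validate characters.
--     body = value.replace("-", "")
--     if len(body) != 10:
--         return False
--     # First char is the prefix 'C'; the remaining must be in the alphabet.
--     if body[0] != _CUSTOMER_ID_PREFIX:
--         return False
--     for ch in body[1:]:
--         if ch not in _CUSTOMER_ID_ALPHABET: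
--             return False
--     return True
-- ===== SOURCE B (Python) =====
-- _CUSTOMER_ID_PREFIX = "C"
--
-- _CUSTOMER_ID_DISPLAY_LEN = 12
--
-- _CUSTOMER_ID_ALPHABET = "ABCDEFGHJKLMNPQRSTUVWXYZ23456789"
--
-- # The nine body positions of the CXXX-XXX-XXX layout (everything except
-- # the prefix at 0 and the hyphens at 4 and 8).
-- _BODY_POSITIONS = (1, 2, 3, 5, 6, 7, 9, 10, 11)
--
--
-- def validate_customer_id(value: str) -> bool:
--     if not isinstance(value, str):
--         return False
--     if len(value) != _CUSTOMER_ID_DISPLAY_LEN: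
--         return False
--     return (
--         value[0] == _CUSTOMER_ID_PREFIX
--         and value[4] == "-"
--         and value[8] == "-"
--         and all(value[i] in _CUSTOMER_ID_ALPHABET for i in _BODY_POSITIONS)
--     )
-- ===== Notes on version B (the rewrite author's own statement) =====
-- stated objective: simpler
-- what changed: B replaces A's hyphen-stripping replace() pass plus a loop over the rebuilt body with a single fixed position table: one length check and direct index tests of the prefix, the two hyphens, and the nine body positions against the alphabet.
import Mathlib
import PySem

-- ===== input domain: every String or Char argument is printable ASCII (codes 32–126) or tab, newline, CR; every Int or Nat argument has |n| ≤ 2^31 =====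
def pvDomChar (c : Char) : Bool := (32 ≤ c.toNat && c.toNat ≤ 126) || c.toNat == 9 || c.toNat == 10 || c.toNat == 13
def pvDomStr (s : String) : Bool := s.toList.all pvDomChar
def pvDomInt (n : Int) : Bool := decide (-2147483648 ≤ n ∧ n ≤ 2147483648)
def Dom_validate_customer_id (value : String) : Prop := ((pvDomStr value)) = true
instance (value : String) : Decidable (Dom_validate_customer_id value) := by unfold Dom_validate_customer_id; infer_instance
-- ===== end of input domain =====

-- B replaces A's replace('-','') pass + loop over the rebuilt body with a fixed
-- table of the nine body positions checked directly against the alphabet (simpler).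

-- ===== PORT A =====
def pvAlphabet : List Char := "ABCDEFGHJKLMNPQRSTUVWXYZ23456789".toList

-- 'for ch in body[1:]: if ch not in _CUSTOMER_ID_ALPHABET: return False' / 'return True'
def pvLoopA : List Char → Bool
  | [] => true
  | ch :: rest => if !(PySem.Chars.isIn [ch] pvAlphabet) then false else pvLoopA rest

def validate_customer_id (value : String) : Bool :=
  let cs := value.toList
  if PySem.Chars.len cs ≠ 12 then false
  else if PySem.List.pyGet? cs 0 ≠ some 'C' then false
  else if PySem.List.pyGet? cs 4 ≠ some '-' ∨ PySem.List.pyGet? cs 8 ≠ some '-' then false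
  else
    let body := PySem.Chars.replace cs ['-'] []
    if PySem.Chars.len body ≠ 10 then false
    else if PySem.List.pyGet? body 0 ≠ some 'C' then false
    else pvLoopA (PySem.List.slice body (some 1) none)

-- ===== PORT B =====
def pvBodyPositions : List Int := [1, 2, 3, 5, 6, 7, 9, 10, 11]

def validate_customer_id_alt (value : String) : Bool :=
  let cs := value.toList
  if PySem.Chars.len cs ≠ 12 then false
  else
    (PySem.List.pyGet? cs 0 == some 'C') &&
    (PySem.List.pyGet? cs 4 == some '-') &&
    (PySem.List.pyGet? cs 8 == some '-') &&
    pvBodyPositions.all (fun i =>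
      match PySem.List.pyGet? cs i with
      | some c => PySem.Chars.isIn [c] pvAlphabet
      | none => false)

-- ===== PRECONDITION & SPEC =====
def Spec_validate_customer_id (value : String) (out : Bool) : Prop := out = validate_customer_id_alt value
instance (value : String) (out : Bool) : Decidable (Spec_validate_customer_id value out) := by unfold Spec_validate_customer_id; infer_instance

-- ===== CLAIM (what is proved, stated in full; the proofs are below) =====
def Claim_equal_validate_customer_id : Prop := ∀ (value : String), Dom_validate_customer_id value → Spec_validate_customer_id value (validate_customer_id value)

-- ===== LEMMAS AND PROOFS =====

theorem pv_go_filter : ∀ (fuel : Nat) (l acc : List Char), l.length ≤ fuel →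
    PySem.Chars.replace.go ['-'] [] fuel l acc = acc.reverse ++ l.filter (fun c => !(c == '-')) := by
  intro fuel
  induction fuel with
  | zero => intro l acc h; simp at h; simp [h, PySem.Chars.replace.go]
  | succ n ih =>
    intro l acc h
    cases l with
    | nil => simp [PySem.Chars.replace.go]
    | cons c t =>
      simp only [PySem.Chars.replace.go]
      by_cases hc : c = '-'
      · simp [hc, List.isPrefixOf, ih t acc (by simpa using h)]
      · have : ¬ ('-' = c) := fun e => hc e.symm
        simp [List.isPrefixOf, this, hc, ih t (c :: acc) (by simpa using h)]

theorem pv_replace_dash (l : List Char) :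
    PySem.Chars.replace l ['-'] [] = l.filter (fun c => !(c == '-')) := by
  simp [PySem.Chars.replace, pv_go_filter l.length l [] le_rfl]

theorem pv_loopA_all (l : List Char) :
    pvLoopA l = l.all (fun c => PySem.Chars.isIn [c] pvAlphabet) := by
  induction l with
  | nil => rfl
  | cons c t ih =>
    by_cases hc : PySem.Chars.isIn [c] pvAlphabet = true <;> simp [pvLoopA, hc, ih]

theorem pv_filter_all_key (l : List Char) :
    (if (l.filter (fun c => !(c == '-'))).length = l.length
     then (l.filter (fun c => !(c == '-'))).all (fun c => PySem.Chars.isIn [c] pvAlphabet)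
     else false) = l.all (fun c => PySem.Chars.isIn [c] pvAlphabet) := by
  by_cases hl : (l.filter (fun c => !(c == '-'))).length = l.length
  · rw [if_pos hl, List.filter_eq_self.mpr (List.length_filter_eq_length_iff.mp hl)]
  · rw [if_neg hl]
    have h2 : ¬ (∀ a ∈ l, (!(a == '-')) = true) := fun h => hl (List.length_filter_eq_length_iff.mpr h)
    push Not at h2
    obtain ⟨a, ha, hpa⟩ := h2
    have ha' : a = '-' := by simpa using hpa
    symm
    rw [List.all_eq_false]
    exact ⟨a, ha, by simp [ha']; decide⟩

-- ===== VERDICT (by name: the statement is the Claim_ definition above) =====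
theorem validate_customer_id_spec : Claim_equal_validate_customer_id := by
  intro value _
  unfold Spec_validate_customer_id validate_customer_id validate_customer_id_alt
  generalize value.toList = l
  by_cases h12 : l.length = 12
  case neg =>
    have hni : ¬ ((l.length : Int) = 12) := by exact_mod_cast h12
    simp [hni]
  case pos =>
    rcases l with _|⟨c0,_|⟨c1,_|⟨c2,_|⟨c3,_|⟨c4,_|⟨c5,_|⟨c6,_|⟨c7,_|⟨c8,_|⟨c9,_|⟨c10,_|⟨c11,rest⟩⟩⟩⟩⟩⟩⟩⟩⟩⟩⟩⟩ <;>
      simp at h12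
    subst h12
    by_cases hc0 : c0 = 'C'
    case neg => simp [hc0, PySem.Chars.len]
    case pos =>
    subst hc0
    by_cases hc4 : c4 = '-'
    case neg => simp [hc4, PySem.Chars.len]
    case pos =>
    subst hc4
    by_cases hc8 : c8 = '-'
    case neg => simp [hc8, PySem.Chars.len]
    case pos =>
    subst hc8
    have hbody : PySem.Chars.replace ['C',c1,c2,c3,'-',c5,c6,c7,'-',c9,c10,c11] ['-'] []
        = 'C' :: List.filter (fun c => !(c == '-')) [c1,c2,c3,c5,c6,c7,c9,c10,c11] := by
      rw [pv_replace_dash]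
      show List.filter (fun c => !(c == '-'))
            ('C' :: ([c1,c2,c3] ++ '-' :: ([c5,c6,c7] ++ '-' :: [c9,c10,c11])))
          = 'C' :: List.filter (fun c => !(c == '-')) ([c1,c2,c3] ++ ([c5,c6,c7] ++ [c9,c10,c11]))
      simp [List.filter_cons]
    have hkey := pv_filter_all_key [c1,c2,c3,c5,c6,c7,c9,c10,c11]
    simp only [List.length_cons, List.length_nil] at hkey
    simp only [hbody, PySem.Chars.len, pv_loopA_all,
      PySem.List.slice_from (('C' :: List.filter (fun c => !(c == '-')) [c1,c2,c3,c5,c6,c7,c9,c10,c11])) (by norm_num : (0:Int) ≤ 1)]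
    have hB : (pvBodyPositions.all fun i =>
        match PySem.List.pyGet? ['C',c1,c2,c3,'-',c5,c6,c7,'-',c9,c10,c11] i with
        | some c => PySem.Chars.isIn [c] pvAlphabet
        | none => false)
        = [c1,c2,c3,c5,c6,c7,c9,c10,c11].all (fun c => PySem.Chars.isIn [c] pvAlphabet) := rfl
    have hkey9 : (if (List.filter (fun c => !(c == '-')) [c1,c2,c3,c5,c6,c7,c9,c10,c11]).length = 9
        then (List.filter (fun c => !(c == '-')) [c1,c2,c3,c5,c6,c7,c9,c10,c11]).all (fun c => PySem.Chars.isIn [c] pvAlphabet)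
        else false) = [c1,c2,c3,c5,c6,c7,c9,c10,c11].all (fun c => PySem.Chars.isIn [c] pvAlphabet) := by
      simpa using hkey
    rw [hB]
    rw [if_neg (show ¬ (((['C',c1,c2,c3,'-',c5,c6,c7,'-',c9,c10,c11].length : Int)) ≠ 12) by simp)]
    rw [if_neg (show ¬ (PySem.List.pyGet? ['C',c1,c2,c3,'-',c5,c6,c7,'-',c9,c10,c11] (0:Int) ≠ some 'C') by simp)]
    rw [if_neg (show ¬ (PySem.List.pyGet? ['C',c1,c2,c3,'-',c5,c6,c7,'-',c9,c10,c11] (4:Int) ≠ some '-' ∨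
        PySem.List.pyGet? ['C',c1,c2,c3,'-',c5,c6,c7,'-',c9,c10,c11] (8:Int) ≠ some '-') by simp)]
    rw [show (PySem.List.pyGet? ['C',c1,c2,c3,'-',c5,c6,c7,'-',c9,c10,c11] (0:Int) == some 'C') = true by simp]
    rw [show (PySem.List.pyGet? ['C',c1,c2,c3,'-',c5,c6,c7,'-',c9,c10,c11] (4:Int) == some '-') = true by simp]
    rw [show (PySem.List.pyGet? ['C',c1,c2,c3,'-',c5,c6,c7,'-',c9,c10,c11] (8:Int) == some '-') = true by simp]
    simp only [Bool.true_and]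
    by_cases hL : (List.filter (fun c => !(c == '-')) [c1,c2,c3,c5,c6,c7,c9,c10,c11]).length = 9
    · rw [if_pos hL] at hkey9
      have h10 : ¬ (((('C' :: List.filter (fun c => !(c == '-')) [c1,c2,c3,c5,c6,c7,c9,c10,c11]).length : Int)) ≠ 10) := by
        simp [hL]
      rw [if_neg h10]
      rw [if_neg (show ¬ (PySem.List.pyGet? ('C' :: List.filter (fun c => !(c == '-')) [c1,c2,c3,c5,c6,c7,c9,c10,c11]) (0:Int) ≠ some 'C')
        by simp [pysem])]
      exact hkey9
    · rw [if_neg hL] at hkey9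
      have h10 : ((('C' :: List.filter (fun c => !(c == '-')) [c1,c2,c3,c5,c6,c7,c9,c10,c11]).length : Int)) ≠ 10 := by
        simp only [List.length_cons]
        omega
      rw [if_pos h10]
      exact hkey9
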